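-- pv_equiv track=rewrite | github.com/miloszlakomy/competitive | codeforces/1270C/a.py | solve
-- ===== SOURCE A (Python) =====
-- import functools
--
-- def solve(A):
--     xored = functools.reduce(lambda a, b: a ^ b, A, 0)
--     summed = sum(A)
--
--     if summed == 0:
--         return []
--
--     if summed == 1:
--         return [3]
--
--     second = 1
--     while second & (summed+xored) == 0:
--         second <<= 1
--     third = (summed+xored) ^ second
--
--     return [xored, second, third]
-- ===== SOURCE B (Python) =====
-- def _lowest_power_of_two_divisor(m):
--     # m > 0: largest power of two dividing m, by arithmetic parity recursion
--     # (no bitwise operators at all).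
--     if m % 2 == 1:
--         return 1
--     return 2 * _lowest_power_of_two_divisor(m // 2)
--
-- def solve(A):
--     # One fused pass accumulates xor and sum together.  Let s = summed + xored.
--     # The value A finds with its bit-shift search loop is the lowest set bit of
--     # s, i.e. the largest power of two dividing |s|, computed here arithmetically
--     # by parity recursion; clearing that (set) bit is plain subtraction, so
--     # third = s - second.
--     xored = 0
--     summed = 0
--     for a in A:
--         xored ^= a
--         summed += a
--     if summed == 0:
--         return []
--     if summed == 1:
--         return [3]
--     s = summed + xored
--     second = _lowest_power_of_two_divisor(abs(s))
--     return [xored, second, s - second]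
-- ===== Notes on version B (the rewrite author's own statement) =====
-- stated objective: alternative
-- what changed: B drops A's bitwise search entirely: it fuses A's two passes (reduce-xor and sum) into one accumulation loop and computes second as the largest power of two dividing |summed+xored| by arithmetic parity recursion (%2 and //2, no bitwise operators), then gets third by plain subtraction s - second instead of A's xor.
import Mathlib
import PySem

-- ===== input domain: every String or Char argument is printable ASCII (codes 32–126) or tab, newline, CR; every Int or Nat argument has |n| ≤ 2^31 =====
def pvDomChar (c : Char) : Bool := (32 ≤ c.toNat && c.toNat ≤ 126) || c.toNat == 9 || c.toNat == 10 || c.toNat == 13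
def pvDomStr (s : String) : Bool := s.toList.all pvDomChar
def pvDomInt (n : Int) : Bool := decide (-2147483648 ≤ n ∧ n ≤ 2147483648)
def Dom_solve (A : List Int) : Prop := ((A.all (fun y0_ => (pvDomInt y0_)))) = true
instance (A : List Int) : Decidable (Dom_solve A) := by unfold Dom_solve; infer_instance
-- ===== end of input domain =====

-- B fuses A's two passes into one accumulation loop and replaces A's bitwise
-- search and xor with arithmetic: second = largest power of two dividing
-- |summed+xored| by parity recursion, third = s - second; same return values
-- on Pre_solve.

-- ===== PORT A =====
-- A's `while second & (summed+xored) == 0: second <<= 1` loop; the fuel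
-- (summed+xored).natAbs + 1 only makes the recursion total — on every input
-- admitted by Pre_solve the loop exits on its own before the fuel runs out
-- (Pre_solve excludes summed+xored = 0, where the Python loop runs forever).
def solveLoop (s : Int) : Nat → Int → Int
  | 0, second => second
  | fuel + 1, second =>
      if PySem.Int.band second s = 0 then solveLoop s fuel (second <<< (1 : Nat))
      else second

def solve (A : List Int) : List Int :=
  let xored := A.foldl (fun a b => PySem.Int.bxor a b) 0
  let summed := A.foldl (fun a b => a + b) 0
  if summed = 0 then []
  else if summed = 1 then [3]
  else
    let second := solveLoop (summed + xored) ((summed + xored).natAbs + 1) 1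
    let third := PySem.Int.bxor (summed + xored) second
    [xored, second, third]

-- ===== PORT B =====
-- B's parity recursion `1 if m % 2 == 1 else 2 * lowbit(m // 2)`; the `m = 0`
-- guard only makes the recursion total — Python's recursion never returns at 0,
-- and Pre_solve excludes the one place B calls it with 0.
def lowbitAlt (m : Nat) : Nat :=
  if m = 0 then 0
  else if m % 2 = 1 then 1
  else 2 * lowbitAlt (m / 2)
decreasing_by omega

def solve_alt (A : List Int) : List Int :=
  let p := A.foldl (fun (p : Int × Int) a => (PySem.Int.bxor p.1 a, p.2 + a)) (0, 0)
  let xored := p.1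
  let summed := p.2
  if summed = 0 then []
  else if summed = 1 then [3]
  else
    let s := summed + xored
    let second : Int := (lowbitAlt s.natAbs : Int)
    [xored, second, s - second]

-- ===== PRECONDITION & SPEC =====
-- Pre_solve excludes exactly the inputs on which A does not return: when the sum
-- is neither 0 nor 1 and sum + xor = 0, A's while loop never finds a set bit and
-- the Python program diverges (B's recursion also fails to return there).
def Pre_solve (A : List Int) : Prop :=
  A.foldl (fun a b => a + b) 0 = 0 ∨ A.foldl (fun a b => a + b) 0 = 1 ∨
    A.foldl (fun a b => a + b) 0 + A.foldl (fun a b => PySem.Int.bxor a b) 0 ≠ 0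
instance (A : List Int) : Decidable (Pre_solve A) := by unfold Pre_solve; infer_instance
def pvWitness_solve : List Int := [1, 2]
def Spec_solve (A : List Int) (out : List Int) : Prop := out = solve_alt A
instance (A : List Int) (out : List Int) : Decidable (Spec_solve A out) := by unfold Spec_solve; infer_instance

-- ===== CLAIM (what is proved, stated in full; the proofs are below) =====
def Claim_equal_solve : Prop := ∀ (A : List Int), Dom_solve A → Pre_solve A → Spec_solve A (solve A)

-- ===== LEMMAS AND PROOFS =====

-- B's fused fold computes A's two folds.
theorem foldl_pair (A : List Int) (x s : Int) :
    A.foldl (fun (p : Int × Int) a => (PySem.Int.bxor p.1 a, p.2 + a)) (x, s) =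
      (A.foldl (fun a b => PySem.Int.bxor a b) x, A.foldl (fun a b => a + b) s) := by
  induction A generalizing x s with
  | nil => rfl
  | cons a t ih => simp [List.foldl, ih]

theorem shiftL_one (a : Int) : a <<< (1 : Nat) = 2 * a := by
  rw [Int.shiftLeft_eq]; ring

-- Nat.bitwise on even/odd decompositions.
theorem nat_bitwise_bit' (f : Bool → Bool → Bool) (hf : f false false = false)
    (a b : Bool) (m n : Nat) :
    Nat.bitwise f (2 * m + (if a then 1 else 0)) (2 * n + (if b then 1 else 0)) =
      2 * Nat.bitwise f m n + (if f a b then 1 else 0) := by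
  have h := Nat.bitwise_bit (f := f) hf a m b n
  simp only [Nat.bit, Bool.cond_eq_ite, two_mul] at h ⊢
  rcases hfab : f a b <;> rcases a <;> rcases b <;> simp_all

theorem nat_and_ee (m n : Nat) : (2 * m) &&& (2 * n) = 2 * (m &&& n) := by
  have := nat_bitwise_bit' and rfl false false m n
  simpa [HAnd.hAnd, AndOp.and, Nat.land] using this

theorem nat_and_oo (m n : Nat) : (2 * m + 1) &&& (2 * n + 1) = 2 * (m &&& n) + 1 := by
  have := nat_bitwise_bit' and rfl true true m n
  simpa [HAnd.hAnd, AndOp.and, Nat.land] using this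

theorem nat_and_eo (m n : Nat) : (2 * m) &&& (2 * n + 1) = 2 * (m &&& n) := by
  have := nat_bitwise_bit' and rfl false true m n
  simpa [HAnd.hAnd, AndOp.and, Nat.land] using this

theorem nat_and_oe (m n : Nat) : (2 * m + 1) &&& (2 * n) = 2 * (m &&& n) := by
  have := nat_bitwise_bit' and rfl true false m n
  simpa [HAnd.hAnd, AndOp.and, Nat.land] using this

theorem nat_or_ee (m n : Nat) : (2 * m) ||| (2 * n) = 2 * (m ||| n) := by
  have := nat_bitwise_bit' or rfl false false m n
  simpa [HOr.hOr, OrOp.or, Nat.lor] using this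

theorem nat_or_oo (m n : Nat) : (2 * m + 1) ||| (2 * n + 1) = 2 * (m ||| n) + 1 := by
  have := nat_bitwise_bit' or rfl true true m n
  simpa [HOr.hOr, OrOp.or, Nat.lor] using this

theorem nat_xor_ee (m n : Nat) : (2 * m) ^^^ (2 * n) = 2 * (m ^^^ n) := by
  have := nat_bitwise_bit' xor rfl false false m n
  simpa [HXor.hXor, Nat.xor] using this

theorem nat_xor_oo (m n : Nat) : (2 * m + 1) ^^^ (2 * n + 1) = 2 * (m ^^^ n) := by
  have := nat_bitwise_bit' xor rfl true true m n
  simpa [HXor.hXor, Nat.xor] using this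

theorem nat_xor_eo (m n : Nat) : (2 * m) ^^^ (2 * n + 1) = 2 * (m ^^^ n) + 1 := by
  have := nat_bitwise_bit' xor rfl false true m n
  simpa [HXor.hXor, Nat.xor] using this

theorem nat_xor_oe (m n : Nat) : (2 * m + 1) ^^^ (2 * n) = 2 * (m ^^^ n) + 1 := by
  have := nat_bitwise_bit' xor rfl true false m n
  simpa [HXor.hXor, Nat.xor] using this

-- band on doubled arguments.
theorem band_ee (a b : Int) : PySem.Int.band (2 * a) (2 * b) = 2 * PySem.Int.band a b := by
  unfold PySem.Int.band
  rcases le_or_gt 0 a with ha | ha <;> rcases le_or_gt 0 b with hb | hb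
  · rw [if_pos (by omega : (0:Int) ≤ 2*a), if_pos (by omega : (0:Int) ≤ 2*b),
      if_pos ha, if_pos hb]
    rw [show (2*a).toNat = 2*a.toNat by omega, show (2*b).toNat = 2*b.toNat by omega,
      nat_and_ee]
    push_cast; ring
  · rw [if_pos (by omega : (0:Int) ≤ 2*a), if_neg (by omega : ¬ (0:Int) ≤ 2*b),
      if_pos ha, if_neg (by omega : ¬ (0:Int) ≤ b)]
    rw [show (2*a).toNat = 2*a.toNat by omega,
      show (-(2*b)-1).toNat = 2*(-b-1).toNat + 1 by omega, nat_and_eo]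
    have hle : a.toNat &&& (-b-1).toNat ≤ a.toNat := Nat.and_le_left
    omega
  · rw [if_neg (by omega : ¬ (0:Int) ≤ 2*a), if_pos (by omega : (0:Int) ≤ 2*b),
      if_neg (by omega : ¬ (0:Int) ≤ a), if_pos hb]
    rw [show (2*b).toNat = 2*b.toNat by omega,
      show (-(2*a)-1).toNat = 2*(-a-1).toNat + 1 by omega, nat_and_eo]
    have hle : b.toNat &&& (-a-1).toNat ≤ b.toNat := Nat.and_le_left
    omega
  · rw [if_neg (by omega : ¬ (0:Int) ≤ 2*a), if_neg (by omega : ¬ (0:Int) ≤ 2*b),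
      if_neg (by omega : ¬ (0:Int) ≤ a), if_neg (by omega : ¬ (0:Int) ≤ b)]
    rw [show (-(2*a)-1).toNat = 2*(-a-1).toNat + 1 by omega,
      show (-(2*b)-1).toNat = 2*(-b-1).toNat + 1 by omega, nat_or_oo]
    omega

theorem band_oo (a b : Int) :
    PySem.Int.band (2 * a + 1) (2 * b + 1) = 2 * PySem.Int.band a b + 1 := by
  unfold PySem.Int.band
  rcases le_or_gt 0 a with ha | ha <;> rcases le_or_gt 0 b with hb | hb
  · rw [if_pos (by omega : (0:Int) ≤ 2*a+1), if_pos (by omega : (0:Int) ≤ 2*b+1),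
      if_pos ha, if_pos hb]
    rw [show (2*a+1).toNat = 2*a.toNat + 1 by omega,
      show (2*b+1).toNat = 2*b.toNat + 1 by omega, nat_and_oo]
    push_cast; ring
  · rw [if_pos (by omega : (0:Int) ≤ 2*a+1), if_neg (by omega : ¬ (0:Int) ≤ 2*b+1),
      if_pos ha, if_neg (by omega : ¬ (0:Int) ≤ b)]
    rw [show (2*a+1).toNat = 2*a.toNat + 1 by omega,
      show (-(2*b+1)-1).toNat = 2*(-b-1).toNat by omega, nat_and_oe]
    have hle : a.toNat &&& (-b-1).toNat ≤ a.toNat := Nat.and_le_left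
    omega
  · rw [if_neg (by omega : ¬ (0:Int) ≤ 2*a+1), if_pos (by omega : (0:Int) ≤ 2*b+1),
      if_neg (by omega : ¬ (0:Int) ≤ a), if_pos hb]
    rw [show (2*b+1).toNat = 2*b.toNat + 1 by omega,
      show (-(2*a+1)-1).toNat = 2*(-a-1).toNat by omega, nat_and_oe]
    have hle : b.toNat &&& (-a-1).toNat ≤ b.toNat := Nat.and_le_left
    omega
  · rw [if_neg (by omega : ¬ (0:Int) ≤ 2*a+1), if_neg (by omega : ¬ (0:Int) ≤ 2*b+1),
      if_neg (by omega : ¬ (0:Int) ≤ a), if_neg (by omega : ¬ (0:Int) ≤ b)]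
    rw [show (-(2*a+1)-1).toNat = 2*(-a-1).toNat by omega,
      show (-(2*b+1)-1).toNat = 2*(-b-1).toNat by omega, nat_or_ee]
    omega

-- bxor on doubled arguments.
theorem bxor_ee (a b : Int) : PySem.Int.bxor (2 * a) (2 * b) = 2 * PySem.Int.bxor a b := by
  unfold PySem.Int.bxor
  rcases le_or_gt 0 a with ha | ha <;> rcases le_or_gt 0 b with hb | hb
  · rw [if_pos (by omega : (0:Int) ≤ 2*a), if_pos (by omega : (0:Int) ≤ 2*b),
      if_pos ha, if_pos hb]
    rw [show (2*a).toNat = 2*a.toNat by omega, show (2*b).toNat = 2*b.toNat by omega,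
      nat_xor_ee]
    push_cast; ring
  · rw [if_pos (by omega : (0:Int) ≤ 2*a), if_neg (by omega : ¬ (0:Int) ≤ 2*b),
      if_pos ha, if_neg (by omega : ¬ (0:Int) ≤ b)]
    rw [show (2*a).toNat = 2*a.toNat by omega,
      show (-(2*b)-1).toNat = 2*(-b-1).toNat + 1 by omega, nat_xor_eo]
    omega
  · rw [if_neg (by omega : ¬ (0:Int) ≤ 2*a), if_pos (by omega : (0:Int) ≤ 2*b),
      if_neg (by omega : ¬ (0:Int) ≤ a), if_pos hb]
    rw [show (2*b).toNat = 2*b.toNat by omega,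
      show (-(2*a)-1).toNat = 2*(-a-1).toNat + 1 by omega, nat_xor_oe]
    omega
  · rw [if_neg (by omega : ¬ (0:Int) ≤ 2*a), if_neg (by omega : ¬ (0:Int) ≤ 2*b),
      if_neg (by omega : ¬ (0:Int) ≤ a), if_neg (by omega : ¬ (0:Int) ≤ b)]
    rw [show (-(2*a)-1).toNat = 2*(-a-1).toNat + 1 by omega,
      show (-(2*b)-1).toNat = 2*(-b-1).toNat + 1 by omega, nat_xor_oo]
    omega

-- xor with 1 clears the (set) lowest bit of an odd integer.
theorem bxor_odd_one (m : Int) : PySem.Int.bxor (2 * m + 1) 1 = 2 * m := by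
  unfold PySem.Int.bxor
  rcases le_or_gt 0 m with hm | hm
  · rw [if_pos (by omega : (0:Int) ≤ 2*m+1), if_pos (by norm_num : (0:Int) ≤ 1)]
    rw [show (2*m+1).toNat = 2*m.toNat + 1 by omega, show (1:Int).toNat = 2*0+1 by rfl,
      nat_xor_oo]
    simp; omega
  · rw [if_neg (by omega : ¬ (0:Int) ≤ 2*m+1), if_pos (by norm_num : (0:Int) ≤ 1)]
    rw [show (-(2*m+1)-1).toNat = 2*(-m-1).toNat by omega, show (1:Int).toNat = 2*0+1 by rfl,
      nat_xor_eo]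
    simp; omega

-- a & ~a = 0 (Python's ~a is -a-1)
theorem band_lnot (a : Int) : PySem.Int.band a (-a - 1) = 0 := by
  unfold PySem.Int.band
  rcases le_or_gt 0 a with ha | ha
  · rw [if_pos ha, if_neg (by omega : ¬ (0:Int) ≤ -a-1),
      show -(-a-1)-1 = a by ring]
    simp
  · rw [if_neg (by omega : ¬ (0:Int) ≤ a), if_pos (by omega : (0:Int) ≤ -a-1)]
    simp

-- an odd integer and its negation share exactly the lowest bit
theorem band_neg_self_odd (m : Int) :
    PySem.Int.band (2 * m + 1) (-(2 * m + 1)) = 1 := by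
  rw [show -(2*m+1) = 2*(-m-1)+1 by ring, band_oo, band_lnot]
  ring

theorem mod_two_odd (m : Int) : PySem.Int.mod (2 * m + 1) 2 = 1 := by
  simp [PySem.Int.mod]

theorem mod_two_even (m : Int) : PySem.Int.mod (2 * m) 2 = 0 := by
  simp [PySem.Int.mod]

theorem band_one_left (t : Int) : PySem.Int.band 1 t = PySem.Int.mod t 2 := by
  rw [PySem.Int.band_comm, PySem.Int.band_one]

-- scaling invariant of A's loop: doubling s and second doubles the result
theorem solveLoop_scale (u : Int) (fuel : Nat) :
    ∀ sec : Int, solveLoop (2 * u) fuel (2 * sec) = 2 * solveLoop u fuel sec := by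
  induction fuel with
  | zero => intro sec; rfl
  | succ f ih =>
      intro sec
      simp only [solveLoop, band_ee, shiftL_one]
      rcases eq_or_ne (PySem.Int.band sec u) 0 with h | h
      · rw [if_pos (show 2 * PySem.Int.band sec u = 0 by rw [h]; ring), if_pos h]
        exact ih (2 * sec)
      · rw [if_neg (by intro hc; apply h; omega), if_neg h]

theorem lowbitAlt_even (k : Nat) (hk : k ≠ 0) : lowbitAlt (2 * k) = 2 * lowbitAlt k := by
  rw [lowbitAlt]
  rw [if_neg (by omega), if_neg (by omega), Nat.mul_div_cancel_left _ (by norm_num)]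

theorem lowbitAlt_odd (k : Nat) (hk : k % 2 = 1) : lowbitAlt k = 1 := by
  rw [lowbitAlt, if_neg (by omega), if_pos hk]

-- for t ≠ 0 and enough fuel, A's loop computes the lowest set bit t & -t
theorem solveLoop_correct : ∀ (n : Nat) (t : Int), t.natAbs = n → t ≠ 0 →
    ∀ fuel : Nat, n < fuel → solveLoop t fuel 1 = PySem.Int.band t (-t) := by
  intro n
  induction n using Nat.strong_induction_on with
  | _ n ih =>
    intro t hn ht fuel hf
    obtain ⟨f, rfl⟩ : ∃ f, fuel = f + 1 := ⟨fuel - 1, by omega⟩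
    rcases Int.even_or_odd t with ⟨u, hu⟩ | ⟨m, hm⟩
    · -- even: t = 2*u, one loop step then scale down
      have hu2 : t = 2 * u := by omega
      have hune : u ≠ 0 := by omega
      simp only [solveLoop]
      rw [if_pos (by rw [band_one_left, hu2, mod_two_even]), shiftL_one,
        hu2, show (2:Int) * 1 = 2 * 1 from rfl, solveLoop_scale,
        ih u.natAbs (by omega) u rfl hune f (by omega),
        show -(2*u) = 2 * (-u) by ring, band_ee]
    · -- odd: the loop exits at once and t & -t = 1
      simp only [solveLoop]
      rw [if_neg (by rw [band_one_left, hm, mod_two_odd]; omega), hm,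
        band_neg_self_odd]

-- t & -t is B's arithmetic lowbit of |t|
theorem band_neg_eq_lowbitAlt : ∀ (n : Nat) (t : Int), t.natAbs = n → t ≠ 0 →
    PySem.Int.band t (-t) = (lowbitAlt t.natAbs : Int) := by
  intro n
  induction n using Nat.strong_induction_on with
  | _ n ih =>
    intro t hn ht
    rcases Int.even_or_odd t with ⟨u, hu⟩ | ⟨m, hm⟩
    · have hu2 : t = 2 * u := by omega
      have hune : u ≠ 0 := by omega
      rw [hu2, show -(2*u) = 2 * (-u) by ring, band_ee,
        ih u.natAbs (by omega) u rfl hune,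
        show (2*u).natAbs = 2 * u.natAbs by omega,
        lowbitAlt_even u.natAbs (by omega)]
      push_cast; ring
    · rw [hm, band_neg_self_odd, lowbitAlt_odd (2*m+1).natAbs (by omega)]
      norm_num

-- clearing the lowest set bit by xor is subtraction
theorem bxor_lowbit_eq_sub : ∀ (n : Nat) (t : Int), t.natAbs = n → t ≠ 0 →
    PySem.Int.bxor t (PySem.Int.band t (-t)) = t - PySem.Int.band t (-t) := by
  intro n
  induction n using Nat.strong_induction_on with
  | _ n ih =>
    intro t hn ht
    rcases Int.even_or_odd t with ⟨u, hu⟩ | ⟨m, hm⟩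
    · have hu2 : t = 2 * u := by omega
      have hune : u ≠ 0 := by omega
      rw [hu2, show -(2*u) = 2 * (-u) by ring, band_ee, bxor_ee,
        ih u.natAbs (by omega) u rfl hune]
      ring
    · rw [hm, band_neg_self_odd, bxor_odd_one]
      ring

-- ===== VERDICT (by name: the statement is the Claim_ definition above) =====
theorem solve_spec : Claim_equal_solve := by
  intro A _ hpre
  unfold Spec_solve solve solve_alt
  rw [foldl_pair]
  set x := A.foldl (fun a b => PySem.Int.bxor a b) 0 with hx
  set s := A.foldl (fun a b => a + b) 0 with hs
  rcases eq_or_ne s 0 with h0 | h0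
  · simp [h0]
  rcases eq_or_ne s 1 with h1 | h1
  · simp [h1]
  have hne : s + x ≠ 0 := by
    rcases hpre with h | h | h
    · exact absurd h h0
    · exact absurd h h1
    · exact h
  simp only [if_neg h0, if_neg h1]
  rw [solveLoop_correct (s + x).natAbs (s + x) rfl hne _ (Nat.lt_succ_self _),
    bxor_lowbit_eq_sub (s + x).natAbs (s + x) rfl hne,
    band_neg_eq_lowbitAlt (s + x).natAbs (s + x) rfl hne]
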